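-- pv_equiv track=rewrite | github.com/dinleo/CodeTest | PyCode/Programmers_Test/Company/Kakao/kakao_2023/1차/4.py | solution
-- ===== SOURCE A (Python) =====
-- def solution(numbers):
--     answer = [0 for _ in range(len(numbers))]
--     for i in range(len(numbers)):
--         n = numbers[i]
--         b = format(n, 'b')
--
--         ceil = 1
--         while ceil <= len(b):
--             ceil *= 2
--         dummy_end_leaf = ceil - len(b) - 1
--         if 2 <= dummy_end_leaf:
--             continue
--         elif dummy_end_leaf == 1:
--             b = '0' + b
--
--         if is_possible(b):
--             answer[i] = 1
--     return answer
--
-- def is_possible(bin_str):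
--     if len(bin_str) == 1:
--         return True
--     mid_idx = int((len(bin_str) + 1) / 2) - 1
--
--     a = bin_str[:mid_idx]
--     mid = bin_str[mid_idx]
--     b = bin_str[mid_idx + 1:]
--     if mid == '0':
--         return False
--     else:
--         return is_possible(a) & is_possible(b)
-- ===== SOURCE B (Python) =====
-- def solution(numbers):
--     return [check(n) for n in numbers]
--
--
-- def check(n):
--     b = format(n, 'b')
--     L = len(b)
--     if (L + 1) & L == 0:        # L == 2^k - 1: already a full-tree layout
--         pass
--     elif (L + 2) & (L + 1) == 0:  # one dummy leaf needed: prepend it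
--         b = '0' + b
--     else:
--         return 0
--     # in the in-order layout the internal nodes are exactly the odd indices
--     return 1 if all(c != '0' for c in b[1::2]) else 0
-- ===== Notes on version B (the rewrite author's own statement) =====
-- stated objective: simpler
-- what changed: Replaces the recursive split-at-the-middle is_possible check with a single linear scan of the odd-indexed characters (the internal nodes of the in-order layout), and replaces the ceil-doubling while loop with the bit trick (L+1)&L==0 for 'length is 2^k-1'.
import Mathlib
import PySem

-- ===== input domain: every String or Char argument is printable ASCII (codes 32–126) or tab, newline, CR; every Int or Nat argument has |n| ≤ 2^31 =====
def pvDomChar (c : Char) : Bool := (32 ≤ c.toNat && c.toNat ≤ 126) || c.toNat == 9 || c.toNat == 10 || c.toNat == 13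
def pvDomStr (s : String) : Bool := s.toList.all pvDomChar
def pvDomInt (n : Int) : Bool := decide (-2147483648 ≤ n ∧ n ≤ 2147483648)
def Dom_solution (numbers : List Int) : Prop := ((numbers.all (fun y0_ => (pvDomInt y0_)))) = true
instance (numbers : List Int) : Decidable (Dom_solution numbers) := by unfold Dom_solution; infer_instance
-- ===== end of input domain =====

-- B replaces the recursive middle-split validity check by one linear scan of the
-- odd-indexed characters and the ceil-doubling loop by the (L+1)&L power-of-two test (objective: simpler).


-- ===== PORT A =====
-- shared helper: Python format(n, 'b') as a list of characters (msb first)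
def pvBits (m : Nat) : List Char :=
  if h : m = 0 then [] else pvBits (m / 2) ++ [if m % 2 = 1 then '1' else '0']
decreasing_by exact Nat.div_lt_self (Nat.pos_of_ne_zero h) (by omega)

def pvFormatB (n : Int) : List Char :=
  if n = 0 then ['0'] else if n < 0 then '-' :: pvBits n.natAbs else pvBits n.natAbs

-- while ceil <= L: ceil *= 2   (the fuel argument is only a totality guard; starting from
-- ceil = 1, fuel = L + 1 is always enough, so this computes exactly Python's loop)
def pvCeilLoop : Nat → Nat → Nat → Nat
  | 0, c, _ => c
  | fuel + 1, c, L => if c ≤ L then pvCeilLoop fuel (2 * c) L else c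

-- is_possible; mid_idx = int((len+1)/2) - 1 is ported as Nat division (exact: Python's float
-- division is exact for these small lengths, and mid_idx ≥ 0 since len ≥ 1 on every call made from solution)
def is_possible (s : List Char) : Bool :=
  if s.length = 1 then true
  else
    -- mid_idx = int((len+1)/2) - 1, inlined at each use
    match hm : PySem.List.pyGet? s (((s.length + 1) / 2 - 1 : Nat) : Int) with
    | none => false   -- Python raises IndexError here (only possible on the empty string, never reached from solution)
    | some m =>
      if m = '0' then false
      else is_possible (PySem.List.slice s none (some (((s.length + 1) / 2 - 1 : Nat) : Int)))
           && is_possible (PySem.List.slice s (some ((((s.length + 1) / 2 - 1 : Nat) : Int) + 1)) none)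
termination_by s.length
decreasing_by
  · have hs : s ≠ [] := by
      intro h; subst h; exact absurd hm (by simp [PySem.List.pyGet?])
    have hlen : 1 ≤ s.length := List.length_pos_of_ne_nil hs
    rw [PySem.List.slice_to_natCast]
    simp only [List.length_take]
    omega
  · have hs : s ≠ [] := by
      intro h; subst h; exact absurd hm (by simp [PySem.List.pyGet?])
    have hlen : 1 ≤ s.length := List.length_pos_of_ne_nil hs
    have : ((((s.length + 1) / 2 - 1 : Nat) : Int) + 1) = ((((s.length + 1) / 2 - 1 + 1 : Nat)) : Int) := by push_cast; ring
    rw [this, PySem.List.slice_from_natCast]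
    simp only [List.length_drop]
    omega

-- loop body of solution's for-loop (i ranges over range(len(numbers)))
def pvStepA (numbers : List Int) (answer : List Int) (i : Int) : List Int :=
  let n := PySem.List.pyGetD numbers i 0   -- numbers[i]; i ∈ range(len) so in range, exact
  let b := pvFormatB n
  let ceil := pvCeilLoop (b.length + 1) 1 b.length
  let dummy : Int := (ceil : Int) - b.length - 1
  if 2 ≤ dummy then answer
  else
    let b := if dummy = 1 then '0' :: b else b
    if is_possible b then answer.set i.toNat 1 else answer

def solution (numbers : List Int) : List Int :=
  (PySem.List.pyRange 0 numbers.length 1).foldl (pvStepA numbers)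
    (List.replicate numbers.length 0)

-- ===== PORT B =====
-- all(c != '0' for c in b[1::2]): drop the head, then look at every second element
def pvOddScan : List Char → Bool
  | [] => true
  | [_] => true
  | _ :: c :: rest => (c != '0') && pvOddScan rest

def pvCheck (n : Int) : Int :=
  let b := pvFormatB n
  let L := b.length
  if (L + 1) &&& L = 0 then (if pvOddScan b then 1 else 0)
  else if (L + 2) &&& (L + 1) = 0 then (if pvOddScan ('0' :: b) then 1 else 0)
  else 0

def solution_alt (numbers : List Int) : List Int := numbers.map pvCheck

-- ===== PRECONDITION & SPEC =====
def Spec_solution (numbers : List Int) (out : List Int) : Prop := out = solution_alt numbers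
instance (numbers : List Int) (out : List Int) : Decidable (Spec_solution numbers out) := by unfold Spec_solution; infer_instance

-- ===== CLAIM (what is proved, stated in full; the proofs are below) =====
def Claim_equal_solution : Prop := ∀ (numbers : List Int), Dom_solution numbers → Spec_solution numbers (solution numbers)

-- ===== LEMMAS AND PROOFS =====

-- per-element value of A's loop body
def pvFA (n : Int) : Int :=
  if 2 ≤ (pvCeilLoop ((pvFormatB n).length + 1) 1 (pvFormatB n).length : Int) - (pvFormatB n).length - 1 then 0
  else if is_possible
      (if (pvCeilLoop ((pvFormatB n).length + 1) 1 (pvFormatB n).length : Int) - (pvFormatB n).length - 1 = 1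
       then '0' :: pvFormatB n else pvFormatB n) then 1 else 0

-- "every odd-indexed character differs from '0'"
def pvOddP (s : List Char) : Prop := ∀ i, (h : i < s.length) → i % 2 = 1 → s[i] ≠ '0'

theorem pvOddScan_iff (s : List Char) : pvOddScan s = true ↔ pvOddP s := by
  induction s using pvOddScan.induct with
  | case1 => simp [pvOddScan, pvOddP]
  | case2 x => unfold pvOddP; simp [pvOddScan]
  | case3 x c rest ih =>
    rw [pvOddScan, Bool.and_eq_true, bne_iff_ne, ih]
    constructor
    · rintro ⟨hc, hr⟩ i h hi
      match i, hi with
      | 1, _ => exact hc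
      | (j+2), _ =>
        simp only [List.getElem_cons_succ]
        exact hr j (by simpa using h) (by omega)
    · intro hp
      refine ⟨hp 1 (by simp) rfl, fun j h hj => ?_⟩
      have := hp (j+2) (by simpa using h) (by omega)
      simpa using this

theorem pvIp_iff : ∀ (k : Nat) (s : List Char), 1 ≤ k → s.length = 2 ^ k - 1 →
    (is_possible s = true ↔ pvOddP s) := by
  intro k
  induction k with
  | zero => intro s h; omega
  | succ k ih =>
    intro s _ hlen
    by_cases hk : k = 0
    · subst hk
      have h1 : s.length = 1 := by simpa using hlen
      rw [is_possible, if_pos h1]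
      simp only [true_iff]
      intro i hi hodd
      omega
    · have hk1 : 1 ≤ k := by omega
      have hpow : 2 ^ (k + 1) = 2 * 2 ^ k := by rw [pow_succ]; ring
      have hp2 : 2 ≤ 2 ^ k := by
        calc 2 = 2 ^ 1 := rfl
        _ ≤ 2 ^ k := Nat.pow_le_pow_right (by omega) hk1
      have hkeven : 2 ^ k % 2 = 0 := by
        have : 2 ^ k = 2 * 2 ^ (k - 1) := by
          rw [← pow_succ']; congr 1; omega
        omega
      have hlen' : s.length = 2 * 2 ^ k - 1 := by rw [hlen, hpow]
      have hne1 : s.length ≠ 1 := by omega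
      have hmid : (s.length + 1) / 2 - 1 = 2 ^ k - 1 := by omega
      have hmlt : 2 ^ k - 1 < s.length := by omega
      rw [is_possible]
      rw [if_neg hne1]
      rw [hmid]
      rw [PySem.List.pyGet?_natCast]
      split
      · rename_i hnone
        simp [List.getElem?_eq_getElem hmlt] at hnone
      rename_i m hsome
      rw [List.getElem?_eq_getElem hmlt] at hsome
      obtain rfl : m = s[2 ^ k - 1] := by injection hsome with h; exact h.symm
      rw [PySem.List.slice_to_natCast]
      have hcast : (((2 ^ k - 1 : Nat) : Int) + 1) = (((2 ^ k - 1 + 1 : Nat)) : Int) := by push_cast; ring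
      rw [hcast, PySem.List.slice_from_natCast]
      have hltake : (s.take (2 ^ k - 1)).length = 2 ^ k - 1 := by
        simp [List.length_take]; omega
      have hldrop : (s.drop (2 ^ k - 1 + 1)).length = 2 ^ k - 1 := by
        simp [List.length_drop]; omega
      by_cases h0 : s[2 ^ k - 1] = '0'
      · rw [if_pos h0]
        simp only [Bool.false_eq_true, false_iff]
        intro hP
        exact hP (2 ^ k - 1) hmlt (by omega) h0
      · rw [if_neg h0, Bool.and_eq_true, ih _ hk1 hltake, ih _ hk1 hldrop]
        constructor
        · rintro ⟨hL, hR⟩ i hi hodd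
          rcases Nat.lt_trichotomy i (2 ^ k - 1) with hlt | heq | hgt
          · have := hL i (by omega) hodd
            rwa [List.getElem_take] at this
          · subst heq; exact h0
          · have hj : i - (2 ^ k - 1 + 1) < (s.drop (2 ^ k - 1 + 1)).length := by omega
            have := hR _ hj (by omega)
            rw [List.getElem_drop] at this
            have hi' : 2 ^ k - 1 + 1 + (i - (2 ^ k - 1 + 1)) = i := by omega
            simpa [hi'] using this
        · intro hP
          refine ⟨fun i hi hodd => ?_, fun i hi hodd => ?_⟩
          · rw [List.getElem_take]
            exact hP i (by omega) hodd
          · rw [List.getElem_drop]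
            exact hP _ (by omega) (by omega)

theorem pvBits_len_le : ∀ (j m : Nat), m < 2 ^ j → (pvBits m).length ≤ j := by
  intro j
  induction j with
  | zero => intro m hm; interval_cases m; simp [pvBits]
  | succ j ih =>
    intro m hm
    rw [pvBits]
    split
    · simp
    · have h2 : m / 2 < 2 ^ j := by omega
      have := ih (m / 2) h2
      simp only [List.length_append, List.length_cons, List.length_nil]
      omega

theorem pvBits_ne_nil (m : Nat) (h : m ≠ 0) : pvBits m ≠ [] := by
  rw [pvBits]; simp [h]

theorem pvFormatB_len (n : Int) (h : pvDomInt n = true) :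
    1 ≤ (pvFormatB n).length ∧ (pvFormatB n).length ≤ 33 := by
  have hb : n.natAbs < 2 ^ 32 := by
    simp [pvDomInt] at h
    omega
  have hlen := pvBits_len_le 32 n.natAbs hb
  unfold pvFormatB
  split
  · simp
  · split
    · simp only [List.length_cons]
      omega
    · rename_i h0 hneg
      have : n.natAbs ≠ 0 := by omega
      have := List.length_pos_of_ne_nil (pvBits_ne_nil _ this)
      omega

theorem pvBranch : ∀ L : Nat, L < 34 → 1 ≤ L →
    ((2 ≤ (pvCeilLoop (L + 1) 1 L : Int) - L - 1) ↔ ((L + 1) &&& L ≠ 0 ∧ (L + 2) &&& (L + 1) ≠ 0)) ∧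
    (((pvCeilLoop (L + 1) 1 L : Int) - L - 1 = 1) ↔ ((L + 1) &&& L ≠ 0 ∧ (L + 2) &&& (L + 1) = 0 ∧ (L + 2 = 4 ∨ L + 2 = 8 ∨ L + 2 = 16 ∨ L + 2 = 32))) ∧
    ((¬ 2 ≤ (pvCeilLoop (L + 1) 1 L : Int) - L - 1 ∧ (pvCeilLoop (L + 1) 1 L : Int) - L - 1 ≠ 1) → ((L + 1) &&& L = 0 ∧ (L + 1 = 2 ∨ L + 1 = 4 ∨ L + 1 = 8 ∨ L + 1 = 16 ∨ L + 1 = 32))) := by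
  intro L hL h1
  interval_cases L <;> exact ⟨by decide, by decide, by decide⟩

theorem pvCheck_eq (n : Int) : pvCheck n =
    (if ((pvFormatB n).length + 1) &&& (pvFormatB n).length = 0 then (if pvOddScan (pvFormatB n) then 1 else 0)
     else if ((pvFormatB n).length + 2) &&& ((pvFormatB n).length + 1) = 0 then (if pvOddScan ('0' :: pvFormatB n) then 1 else 0)
     else 0) := rfl

theorem pvIp_eq_oddScan (k : Nat) (s : List Char) (hk : 1 ≤ k) (hl : s.length = 2 ^ k - 1) :
    is_possible s = pvOddScan s := by
  have h1 := pvIp_iff k s hk hl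
  have h2 := pvOddScan_iff s
  cases hip : is_possible s <;> cases hsc : pvOddScan s <;> simp_all

theorem pvFA_eq_check (n : Int) (h : pvDomInt n = true) : pvFA n = pvCheck n := by
  obtain ⟨hL1, hL33⟩ := pvFormatB_len n h
  obtain ⟨hA, hB, hC⟩ := pvBranch (pvFormatB n).length (by omega) hL1
  rw [pvCheck_eq]
  unfold pvFA
  by_cases h2 : 2 ≤ (pvCeilLoop ((pvFormatB n).length + 1) 1 (pvFormatB n).length : Int) - (pvFormatB n).length - 1
  · obtain ⟨hx, hy⟩ := hA.mp h2
    rw [if_pos h2, if_neg hx, if_neg hy]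
  · rw [if_neg h2]
    by_cases h1 : (pvCeilLoop ((pvFormatB n).length + 1) 1 (pvFormatB n).length : Int) - (pvFormatB n).length - 1 = 1
    · obtain ⟨hx, hy, hor⟩ := hB.mp h1
      rw [if_pos h1, if_neg hx, if_pos hy]
      have hip : is_possible ('0' :: pvFormatB n) = pvOddScan ('0' :: pvFormatB n) := by
        rcases hor with h4 | h4 | h4 | h4
        · exact pvIp_eq_oddScan 2 _ (by omega) (by simp [List.length_cons]; omega)
        · exact pvIp_eq_oddScan 3 _ (by omega) (by simp [List.length_cons]; omega)
        · exact pvIp_eq_oddScan 4 _ (by omega) (by simp [List.length_cons]; omega)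
        · exact pvIp_eq_oddScan 5 _ (by omega) (by simp [List.length_cons]; omega)
      rw [hip]
    · obtain ⟨hx, hor⟩ := hC ⟨h2, h1⟩
      rw [if_neg h1, if_pos hx]
      have hip : is_possible (pvFormatB n) = pvOddScan (pvFormatB n) := by
        rcases hor with h4 | h4 | h4 | h4 | h4
        · exact pvIp_eq_oddScan 1 _ (by omega) (by omega)
        · exact pvIp_eq_oddScan 2 _ (by omega) (by omega)
        · exact pvIp_eq_oddScan 3 _ (by omega) (by omega)
        · exact pvIp_eq_oddScan 4 _ (by omega) (by omega)
        · exact pvIp_eq_oddScan 5 _ (by omega) (by omega)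
      rw [hip]

theorem pvFA_zero_or_one (n : Int) : pvFA n = 0 ∨ pvFA n = 1 := by
  unfold pvFA
  split_ifs <;> simp_all

theorem pvStepA_char (ns answer : List Int) (k : Nat) (hk : k < ns.length) :
    pvStepA ns answer ((k : Int)) = if pvFA (ns.getD k 0) = 1 then answer.set k 1 else answer := by
  show (if 2 ≤ (pvCeilLoop ((pvFormatB (PySem.List.pyGetD ns (k : Int) 0)).length + 1) 1 (pvFormatB (PySem.List.pyGetD ns (k : Int) 0)).length : Int) - (pvFormatB (PySem.List.pyGetD ns (k : Int) 0)).length - 1 then answer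
    else if is_possible
        (if (pvCeilLoop ((pvFormatB (PySem.List.pyGetD ns (k : Int) 0)).length + 1) 1 (pvFormatB (PySem.List.pyGetD ns (k : Int) 0)).length : Int) - (pvFormatB (PySem.List.pyGetD ns (k : Int) 0)).length - 1 = 1
         then '0' :: pvFormatB (PySem.List.pyGetD ns (k : Int) 0) else pvFormatB (PySem.List.pyGetD ns (k : Int) 0))
      then answer.set ((k : Int)).toNat 1 else answer) = _
  rw [PySem.List.pyGetD_natCast]
  unfold pvFA
  split_ifs <;> simp_all

theorem pvFoldInv (ns : List Int) : ∀ (k : Nat), k ≤ ns.length →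
    (PySem.List.pyRange 0 (k : Int) 1).foldl (pvStepA ns) (List.replicate ns.length 0)
      = (ns.take k).map pvFA ++ List.replicate (ns.length - k) 0 := by
  intro k
  induction k with
  | zero => simp [PySem.List.pyRange]
  | succ k ih =>
    intro hk
    have hk' : k ≤ ns.length := by omega
    have hrange : PySem.List.pyRange 0 ((k : Int) + 1) 1 = PySem.List.pyRange 0 (k : Int) 1 ++ [(k : Int)] := by
      rw [PySem.List.pyRange_one_succ_right] <;> omega
    have hcast : (((k + 1 : Nat)) : Int) = (k : Int) + 1 := by push_cast; ring
    rw [hcast, hrange, List.foldl_append, ih hk']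
    simp only [List.foldl_cons, List.foldl_nil]
    rw [pvStepA_char ns _ k (by omega)]
    have hpre : ((ns.take k).map pvFA).length = k := by
      simp [List.length_take]; omega
    have hrep : List.replicate (ns.length - k) (0 : Int) = 0 :: List.replicate (ns.length - (k + 1)) 0 := by
      have : ns.length - k = (ns.length - (k + 1)) + 1 := by omega
      rw [this, List.replicate_succ]
    have htake : (ns.take (k + 1)).map pvFA = (ns.take k).map pvFA ++ [pvFA ns[k]] := by
      rw [List.take_add_one, List.getElem?_eq_getElem (show k < ns.length by omega)]
      rw [Option.toList_some, List.map_append, List.map_cons, List.map_nil]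
      rfl
    have hgetD : ns.getD k 0 = ns[k] := List.getD_eq_getElem ns 0 (by omega)
    rw [hgetD, hrep, htake]
    rcases pvFA_zero_or_one ns[k] with h0 | h1
    · rw [h0, if_neg (by omega)]
      simp
    · rw [h1, if_pos rfl, List.set_append]
      rw [hpre]
      simp

theorem pv_sol_map (ns : List Int) : solution ns = ns.map pvFA := by
  unfold solution
  have := pvFoldInv ns ns.length le_rfl
  simpa using this

-- ===== VERDICT (by name: the statement is the Claim_ definition above) =====
theorem solution_spec : Claim_equal_solution := by
  intro ns hdom
  unfold Spec_solution solution_alt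
  rw [pv_sol_map]
  refine List.map_congr_left ?_
  intro n hn
  exact pvFA_eq_check n (by
    unfold Dom_solution at hdom
    simpa using (List.all_eq_true.mp hdom n hn))
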